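-- pv_equiv track=rewrite | github.com/Innovailable/Hardcode-Haml | src/hardcode_haml/parser.py | find_unescaped
-- ===== SOURCE A (Python) =====
-- def is_escaped(value, index):
--     '''Returns True if the character at index is escaped with a \ '''
--     cur = index - 1
--
--     if cur < 0:
--         return False
--
--     # loop while on a backshlash
--     while value[cur] == '\\':
--         cur -= 1
--
--         # the end is neigh, let's stop
--         if cur < 0:
--             break
--
--     # uneven number of backslashs?
--     return (index - cur - 1) % 2
--
-- def find_unescaped(haystack, needle, start=0):
--     '''Returns the index of the first unescaped appearance of needle in
--     haystack or -1'''
--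
--     last = start
--
--     while True:
--         index = haystack.find(needle, last)
--
--         # nothing found
--         if index == -1:
--             break
--
--         if is_escaped(haystack, index):
--             # the needle escaped, let's go on
--             last = index + 1
--         else:
--             # we found the needle
--             return index
--
--     return -1
-- ===== SOURCE B (Python) =====
-- def find_unescaped(haystack, needle, start=0):
--     '''Returns the index of the first unescaped appearance of needle in
--     haystack or -1'''
--     n = len(haystack)
--     s = start + n if start < 0 else start
--     if s < 0:
--         s = 0
--     run = 0  # length of the run of consecutive backslashes ending just before i
--     for i in range(0, n + 1):
--         if i >= s and run % 2 == 0 and haystack.startswith(needle, i):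
--             return i
--         if i < n and haystack[i] == '\\':
--             run += 1
--         else:
--             run = 0
--     return -1
-- ===== Notes on version B (the rewrite author's own statement) =====
-- stated objective: alternative
-- what changed: A repeatedly calls str.find and re-scans backwards over the backslash run before each candidate match; B makes one forward pass over the haystack, maintaining the backslash-run parity incrementally and testing startswith at each position at or beyond the (find-style clamped) start.
import Mathlib
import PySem

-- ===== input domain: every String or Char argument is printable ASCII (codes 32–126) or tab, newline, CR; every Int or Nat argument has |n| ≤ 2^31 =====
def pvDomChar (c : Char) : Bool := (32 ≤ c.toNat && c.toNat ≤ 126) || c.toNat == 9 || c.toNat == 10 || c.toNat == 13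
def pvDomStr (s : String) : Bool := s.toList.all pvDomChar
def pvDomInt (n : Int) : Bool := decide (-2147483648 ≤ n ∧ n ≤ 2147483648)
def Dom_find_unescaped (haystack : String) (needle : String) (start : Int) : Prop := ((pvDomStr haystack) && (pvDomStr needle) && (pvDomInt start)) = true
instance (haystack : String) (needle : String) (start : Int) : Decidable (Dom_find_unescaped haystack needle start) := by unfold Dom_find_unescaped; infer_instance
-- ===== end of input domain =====

-- B replaces A's repeated str.find + backward escape-parity re-scan by one forward scan that
-- maintains the backslash-run parity incrementally (objective: alternative single-pass decomposition).

-- ===== PORT A =====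
-- is_escaped's backward while-loop over backslashes: returns the final value of `cur`
-- (-1 when the loop ran off the front of the string).
def pvEscRun (value : List Char) : Nat → Int
  | 0 => if value.getD 0 ' ' = '\\' then -1 else 0
  | c + 1 => if value.getD (c + 1) ' ' = '\\' then pvEscRun value c else ((c : Int) + 1)

-- A's is_escaped; its truthy int result (index - cur - 1) % 2 is ported as a Bool.
-- value[cur] is always in range when called from find_unescaped's loop, so getD is exact there.
def pvIsEscaped (value : List Char) (index : Int) : Bool :=
  if index - 1 < 0 then false
  else decide (PySem.Int.mod (index - pvEscRun value (index - 1).toNat - 1) 2 ≠ 0)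

-- A's while-True loop; `last` strictly increases after the first iteration and is bounded
-- by len+1, so fuel len+3 is never exhausted (the 0 case is unreachable).
def pvFindLoop (haystack needle : List Char) (last : Int) : Nat → Int
  | 0 => -1
  | fuel + 1 =>
    let index := PySem.Chars.findFrom haystack needle last none
    if index = -1 then -1
    else if pvIsEscaped haystack index then pvFindLoop haystack needle (index + 1) fuel
    else index

def find_unescaped (haystack : String) (needle : String) (start : Int) : Int :=
  pvFindLoop haystack.toList needle.toList start (haystack.toList.length + 3)

-- ===== PORT B =====
-- B's forward for-loop over i = 0..n with the running backslash count `run`;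
-- haystack.startswith(needle, i) is needle.isPrefixOf (haystack.drop i) since 0 ≤ i ≤ n.
def pvScan (needle : List Char) (s : Nat) : List Char → Nat → Nat → Int
  | [], i, run =>
    if s ≤ i ∧ run % 2 = 0 ∧ needle.isPrefixOf [] then (i : Int) else -1
  | c :: rest, i, run =>
    if s ≤ i ∧ run % 2 = 0 ∧ needle.isPrefixOf (c :: rest) then (i : Int)
    else pvScan needle s rest (i + 1) (if c = '\\' then run + 1 else 0)

def find_unescaped_alt (haystack : String) (needle : String) (start : Int) : Int :=
  let hs := haystack.toList
  let n : Int := hs.length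
  let s0 := if start < 0 then start + n else start
  let s := if s0 < 0 then 0 else s0
  pvScan needle.toList s.toNat hs 0 0

-- ===== PRECONDITION & SPEC =====
def Spec_find_unescaped (haystack : String) (needle : String) (start : Int) (out : Int) : Prop := out = find_unescaped_alt haystack needle start
instance (haystack : String) (needle : String) (start : Int) (out : Int) : Decidable (Spec_find_unescaped haystack needle start out) := by unfold Spec_find_unescaped; infer_instance

-- ===== CLAIM (what is proved, stated in full; the proofs are below) =====
def Claim_equal_find_unescaped : Prop := ∀ (haystack : String) (needle : String) (start : Int), Dom_find_unescaped haystack needle start → Spec_find_unescaped haystack needle start (find_unescaped haystack needle start)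

-- ===== LEMMAS AND PROOFS =====

-- length of the run of consecutive backslashes in hs ending just before position i
def pvRunPre (hs : List Char) : Nat → Nat
  | 0 => 0
  | i + 1 => if hs.getD i ' ' = '\\' then pvRunPre hs i + 1 else 0

-- the common specification: first j with s ≤ j ≤ n, needle matching at j, even run parity
def pvFirst (hs nl : List Char) (s : Nat) : Int :=
  match (List.range (hs.length + 1)).find?
      (fun j => decide (s ≤ j ∧ pvRunPre hs j % 2 = 0 ∧ nl <+: hs.drop j)) with
  | some j => (j : Int)
  | none => -1

theorem pvEscRun_eq (hs : List Char) (c : Nat) :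
    pvEscRun hs c = (c : Int) - pvRunPre hs (c + 1) := by
  induction c with
  | zero =>
    simp only [pvEscRun]
    split <;> rename_i h <;> rw [List.getD_eq_getElem?_getD] at h <;> simp [pvRunPre, h]
  | succ c ih =>
    by_cases h : hs.getD (c + 1) ' ' = '\\'
    · rw [pvEscRun, if_pos h, ih, show pvRunPre hs (c + 1 + 1) = pvRunPre hs (c + 1) + 1 from by
        rw [pvRunPre, if_pos h]]
      push_cast; ring
    · rw [pvEscRun, if_neg h, show pvRunPre hs (c + 1 + 1) = 0 from by rw [pvRunPre, if_neg h]]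
      push_cast; ring

theorem pvIsEscaped_eq (hs : List Char) (m : Nat) :
    pvIsEscaped hs (m : Int) = decide (pvRunPre hs m % 2 = 1) := by
  cases m with
  | zero => simp [pvIsEscaped, pvRunPre]
  | succ c =>
    have h1 : ((c + 1 : Nat) : Int) - 1 = (c : Int) := by push_cast; ring
    rw [pvIsEscaped, h1, if_neg (by omega : ¬ ((c : Int) < 0)), Int.toNat_natCast,
      pvEscRun_eq]
    have h2 : ((c + 1 : Nat) : Int) - ((c : Int) - pvRunPre hs (c + 1)) - 1
        = ((pvRunPre hs (c + 1) : Int)) := by push_cast; ring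
    have h3 : PySem.Int.mod ((pvRunPre hs (c + 1) : Int)) 2 = ((pvRunPre hs (c + 1) % 2 : Nat) : Int) := by
      exact_mod_cast PySem.Int.mod_natCast (pvRunPre hs (c + 1)) 2
    rw [h2, h3]
    simp only [ne_eq, decide_eq_decide]
    omega

theorem pvFind?_range_eq_none {p : Nat → Bool} {N : Nat} (h : ∀ j < N, p j = false) :
    (List.range N).find? p = none := by
  rw [List.find?_eq_none]
  intro j hj
  simp [h j (List.mem_range.mp hj)]

theorem pvFind?_range_eq_some {p : Nat → Bool} {N m : Nat} (hm : m < N) (hp : p m = true)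
    (hlt : ∀ j < m, p j = false) : (List.range N).find? p = some m := by
  induction N with
  | zero => omega
  | succ N ih =>
    rw [List.range_succ, List.find?_append]
    rcases Nat.lt_or_ge m N with h | h
    · rw [ih h]; rfl
    · have hmN : m = N := by omega
      subst hmN
      rw [pvFind?_range_eq_none hlt]
      simp [hp]

-- a needle matching at j ≥ k is an infix of the k-suffix
theorem pvPrefix_drop_infix {nl hs : List Char} {k j : Nat} (hkj : k ≤ j)
    (h : nl <+: hs.drop j) : nl <:+: hs.drop k := by
  have h2 : hs.drop j = (hs.drop k).drop (j - k) := by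
    rw [List.drop_drop]; congr 1; omega
  rw [h2] at h
  exact h.isInfix.trans (List.drop_suffix _ _).isInfix

-- findFrom clamps a negative start exactly like B's s
theorem pvFindFrom_neg (s sub : List Char) (k : Int) (hk : k < 0) :
    PySem.Chars.findFrom s sub k none
      = PySem.Chars.findFrom s sub (if k + s.length < 0 then 0 else k + s.length) none := by
  unfold PySem.Chars.findFrom
  simp only
  split_ifs <;> first | rfl | omega

-- findFrom past the end is -1 (CPython quirk, also for the empty needle)
theorem pvFindFrom_gt (s sub : List Char) (k : Int) (hk : (s.length : Int) < k) :
    PySem.Chars.findFrom s sub k none = -1 := by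
  unfold PySem.Chars.findFrom
  simp only
  split_ifs <;> first | rfl | omega

theorem pvScan_go (hs nl : List Char) (s : Nat) :
    ∀ rest i, i ≤ hs.length → rest = hs.drop i →
    pvScan nl s rest i (pvRunPre hs i)
      = match (List.range' i (hs.length + 1 - i)).find?
            (fun j => decide (s ≤ j ∧ pvRunPre hs j % 2 = 0 ∧ nl <+: hs.drop j)) with
        | some j => (j : Int)
        | none => -1 := by
  intro rest
  induction rest with
  | nil =>
    intro i hi hd
    have hin : i = hs.length := by
      have := List.drop_eq_nil_iff.mp hd.symm
      omega
    subst hin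
    have h1 : hs.length + 1 - hs.length = 1 := by omega
    rw [h1, List.range'_one, List.find?_singleton]
    rw [pvScan]
    by_cases hp : s ≤ hs.length ∧ pvRunPre hs hs.length % 2 = 0 ∧ nl.isPrefixOf []
    · rw [if_pos hp]
      have : (decide (s ≤ hs.length ∧ pvRunPre hs hs.length % 2 = 0 ∧ nl <+: hs.drop hs.length)) = true := by
        simp only [decide_eq_true_eq, ← hd]
        exact ⟨hp.1, hp.2.1, List.isPrefixOf_iff_prefix.mp hp.2.2⟩
      rw [this]; rfl
    · rw [if_neg hp]
      have : (decide (s ≤ hs.length ∧ pvRunPre hs hs.length % 2 = 0 ∧ nl <+: hs.drop hs.length)) = false := by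
        simp only [decide_eq_false_iff_not, ← hd]
        intro ⟨a, b, c⟩
        exact hp ⟨a, b, List.isPrefixOf_iff_prefix.mpr c⟩
      rw [this]; rfl
  | cons c rest ih =>
    intro i hi hd
    have hin : i < hs.length := by
      by_contra h
      rw [List.drop_eq_nil_iff.mpr (by omega)] at hd
      simp at hd
    have hgc : hs.getD i ' ' = c := by
      rw [List.getD_eq_getElem?_getD, ← List.head?_drop, ← hd]; rfl
    have hdrest : rest = hs.drop (i + 1) := by
      rw [← List.tail_drop, ← hd]; rfl
    have hrun : pvRunPre hs (i + 1) = (if c = '\\' then pvRunPre hs i + 1 else 0) := by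
      rw [pvRunPre, hgc]
    have hrange : hs.length + 1 - i = (hs.length - i) + 1 := by omega
    rw [hrange, List.range'_succ, List.find?_cons]
    rw [pvScan]
    by_cases hp : s ≤ i ∧ pvRunPre hs i % 2 = 0 ∧ nl.isPrefixOf (c :: rest)
    · rw [if_pos hp]
      have : (decide (s ≤ i ∧ pvRunPre hs i % 2 = 0 ∧ nl <+: hs.drop i)) = true := by
        simp only [decide_eq_true_eq, ← hd]
        exact ⟨hp.1, hp.2.1, List.isPrefixOf_iff_prefix.mp hp.2.2⟩
      rw [this]
    · rw [if_neg hp]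
      have hfalse : (decide (s ≤ i ∧ pvRunPre hs i % 2 = 0 ∧ nl <+: hs.drop i)) = false := by
        simp only [decide_eq_false_iff_not, ← hd]
        intro ⟨a, b, hc⟩
        exact hp ⟨a, b, List.isPrefixOf_iff_prefix.mpr hc⟩
      rw [hfalse, ← hrun, ih (i + 1) (by omega) hdrest]
      have : hs.length + 1 - (i + 1) = hs.length - i := by omega
      rw [this]

theorem pvScan_eq (hs nl : List Char) (s : Nat) :
    pvScan nl s hs 0 0 = pvFirst hs nl s := by
  have h0 := pvScan_go hs nl s hs 0 (by omega) (by simp)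
  rw [show pvRunPre hs 0 = 0 from rfl] at h0
  rw [h0, pvFirst, List.range_eq_range']
  simp

theorem pvFindLoop_eq (hs nl : List Char) (s : Nat) :
    ∀ fuel k, s ≤ k → hs.length + 1 - k < fuel →
    (∀ j, s ≤ j → j < k → ¬ (pvRunPre hs j % 2 = 0 ∧ nl <+: hs.drop j)) →
    pvFindLoop hs nl (k : Int) fuel = pvFirst hs nl s := by
  intro fuel
  induction fuel with
  | zero => intro k _ hfuel _; omega
  | succ fuel ih =>
    intro k hsk hfuel hinv
    rw [pvFindLoop]
    by_cases hk : k ≤ hs.length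
    · rw [PySem.Chars.findFrom_natCast hs nl k hk]
      by_cases hfind : PySem.Chars.find (hs.drop k) nl = -1
      · rw [if_pos hfind]
        have hnone : (List.range (hs.length + 1)).find?
            (fun j => decide (s ≤ j ∧ pvRunPre hs j % 2 = 0 ∧ nl <+: hs.drop j)) = none := by
          apply pvFind?_range_eq_none
          intro j hj
          simp only [decide_eq_false_iff_not]
          intro ⟨hsj, hgood⟩
          rcases Nat.lt_or_ge j k with h | h
          · exact hinv j hsj h hgood
          · exact ((PySem.Chars.find_eq_neg_one_iff _ _).mp hfind) (pvPrefix_drop_infix h hgood.2)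
        rw [pvFirst, hnone]
        simp
      · rw [if_neg hfind]
        have hr0 : 0 ≤ PySem.Chars.find (hs.drop k) nl := by
          have := PySem.Chars.neg_one_le_find (hs.drop k) nl
          omega
        set r := PySem.Chars.find (hs.drop k) nl with hrdef
        have hspec := PySem.Chars.find_spec (s := hs.drop k) (sub := nl) hr0
        have hrlen : r ≤ (hs.drop k).length := PySem.Chars.find_le_length (hs.drop k) nl
        rw [List.length_drop] at hrlen
        set m := k + r.toNat with hmdef
        have hmlen : m ≤ hs.length := by omega
        have hcast : (k : Int) + r = (m : Int) := by omega
        have hmin : ∀ j, k ≤ j → j < m → ¬ nl <+: hs.drop j := by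
          intro j hkj hjm hpre
          have h1 : hs.drop j = (hs.drop k).drop (j - k) := by
            rw [List.drop_drop]; congr 1; omega
          rw [h1] at hpre
          exact hspec.2 (j - k) (by omega) hpre
        have hprem : nl <+: hs.drop m := by
          have h1 : hs.drop m = (hs.drop k).drop r.toNat := by
            rw [List.drop_drop]
          rw [h1]
          exact hspec.1
        rw [hcast]
        have hne : ((m : Int)) ≠ -1 := by omega
        rw [if_neg hne, pvIsEscaped_eq]
        by_cases hpar : pvRunPre hs m % 2 = 1
        · rw [if_pos (by simp [hpar])]
          have hstep : ((m : Int)) + 1 = ((m + 1 : Nat) : Int) := by omega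
          rw [hstep]
          apply ih (m + 1) (by omega) (by omega)
          intro j hsj hjm1 hgood
          rcases Nat.lt_or_ge j k with h | h
          · exact hinv j hsj h hgood
          · rcases Nat.lt_or_ge j m with h2 | h2
            · exact hmin j h h2 hgood.2
            · have : j = m := by omega
              subst this
              omega
        · rw [if_neg (by simp [hpar])]
          have hsome : (List.range (hs.length + 1)).find?
              (fun j => decide (s ≤ j ∧ pvRunPre hs j % 2 = 0 ∧ nl <+: hs.drop j)) = some m := by
            apply pvFind?_range_eq_some (by omega)
            · simp only [decide_eq_true_eq]
              exact ⟨by omega, by omega, hprem⟩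
            · intro j hj
              simp only [decide_eq_false_iff_not]
              intro ⟨hsj, hgood⟩
              rcases Nat.lt_or_ge j k with h | h
              · exact hinv j hsj h hgood
              · exact hmin j h hj hgood.2
          rw [pvFirst, hsome]
    · rw [pvFindFrom_gt hs nl k (by omega), if_pos rfl]
      have hnone : (List.range (hs.length + 1)).find?
          (fun j => decide (s ≤ j ∧ pvRunPre hs j % 2 = 0 ∧ nl <+: hs.drop j)) = none := by
        apply pvFind?_range_eq_none
        intro j hj
        simp only [decide_eq_false_iff_not]
        intro ⟨hsj, hgood⟩
        exact hinv j hsj (by omega) hgood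
      rw [pvFirst, hnone]

theorem pvLoop_congr (hs nl : List Char) (a b : Int) (fuel : Nat)
    (h : PySem.Chars.findFrom hs nl a none = PySem.Chars.findFrom hs nl b none) :
    pvFindLoop hs nl a (fuel + 1) = pvFindLoop hs nl b (fuel + 1) := by
  rw [pvFindLoop, pvFindLoop, h]

theorem pvMain (haystack needle : String) (start : Int) :
    find_unescaped haystack needle start = find_unescaped_alt haystack needle start := by
  unfold find_unescaped find_unescaped_alt
  simp only
  rw [pvScan_eq]
  set hs := haystack.toList with hhs
  set nl := needle.toList with hnl
  set s0 := if start < 0 then start + (hs.length : Int) else start with hs0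
  set sI := if s0 < 0 then 0 else s0 with hsI
  have hsInn : 0 ≤ sI := by rw [hsI]; split_ifs <;> omega
  have hcast : ((sI.toNat : Nat) : Int) = sI := Int.toNat_of_nonneg hsInn
  have happly : pvFindLoop hs nl ((sI.toNat : Nat) : Int) (hs.length + 3) = pvFirst hs nl sI.toNat := by
    apply pvFindLoop_eq hs nl sI.toNat (hs.length + 3) sI.toNat (by omega) (by omega)
    intro j _ hj hgood
    omega
  rcases lt_or_ge start 0 with hneg | hpos
  · have hstep : pvFindLoop hs nl start (hs.length + 3) = pvFindLoop hs nl ((sI.toNat : Nat) : Int) (hs.length + 3) := by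
      rw [show hs.length + 3 = (hs.length + 2) + 1 from rfl]
      apply pvLoop_congr
      rw [pvFindFrom_neg hs nl start hneg, hcast]
      congr 1
      rw [hsI, hs0, if_pos hneg]
    rw [hstep, happly]
  · have hstart : start = ((sI.toNat : Nat) : Int) := by
      rw [hcast, hsI, hs0, if_neg (by omega : ¬ start < 0)]
      rw [if_neg (by omega : ¬ start < 0)]
    rw [hstart] at *
    rw [happly]

-- ===== VERDICT (by name: the statement is the Claim_ definition above) =====
theorem find_unescaped_spec : Claim_equal_find_unescaped := by
  intro haystack needle start _
  exact pvMain haystack needle start
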